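-- pv_equiv track=rewrite | github.com/haoxiang-xu/miso | src/miso/agents/agent.py | _resolve_model_key
-- ===== SOURCE A (Python) =====
-- from typing import TYPE_CHECKING, Any, Callable
--
-- def _resolve_model_key(model: str, registry: dict[str, Any]) -> str | None:
--     if model in registry:
--         return model
--     normalized_model = str(model or "").replace(".", "-")
--     best: str | None = None
--     for key in registry:
--         normalized_key = str(key).replace(".", "-")
--         if (
--             str(model).startswith(key)
--             or str(model).startswith(normalized_key)
--             or normalized_model.startswith(key)
--             or normalized_model.startswith(normalized_key)
--             or key.startswith(str(model))
--             or key.startswith(normalized_model)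
--             or normalized_key.startswith(str(model))
--             or normalized_key.startswith(normalized_model)
--         ) and (best is None or len(key) > len(best)):
--             best = key
--     return best
-- ===== SOURCE B (Python) =====
-- def _resolve_model_key(model, registry):
--     if model in registry:
--         return model
--     normalized_model = str(model or "").replace(".", "-")
--
--     def matches(key):
--         normalized_key = str(key).replace(".", "-")
--         return any(a.startswith(b) or b.startswith(a)
--                    for a in (str(model), normalized_model)
--                    for b in (key, normalized_key))
--
--     for key in sorted(registry, key=len, reverse=True):
--         if matches(key):
--             return key
--     return None
-- ===== Notes on version B (the rewrite author's own statement) =====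
-- stated objective: alternative
-- what changed: Replaces A's running-max linear scan (keep the longest matching key seen so far) with a stable length-descending sort of the keys followed by a first-match short-circuit scan using a factored-out prefix-match helper.
import Mathlib
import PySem

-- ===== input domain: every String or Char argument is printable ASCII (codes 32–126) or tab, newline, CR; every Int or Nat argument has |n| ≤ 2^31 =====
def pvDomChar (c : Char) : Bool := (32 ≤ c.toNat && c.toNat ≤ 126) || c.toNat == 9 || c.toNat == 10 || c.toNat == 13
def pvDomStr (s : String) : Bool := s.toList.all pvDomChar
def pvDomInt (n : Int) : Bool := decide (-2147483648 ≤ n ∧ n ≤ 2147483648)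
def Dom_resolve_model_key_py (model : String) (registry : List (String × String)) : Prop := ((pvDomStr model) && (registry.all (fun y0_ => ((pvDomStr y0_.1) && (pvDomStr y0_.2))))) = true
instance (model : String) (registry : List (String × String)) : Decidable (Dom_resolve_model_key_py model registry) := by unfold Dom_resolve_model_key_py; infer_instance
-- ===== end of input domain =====

-- B replaces A's running-max scan by a stable length-descending sort followed by a
-- first-match scan (objective: alternative decomposition, same result).

-- ===== PORT A =====
def resolve_model_key_py (model : String) (registry : List (String × String)) : Option String :=
  if (PySem.Dict.ofList registry).contains model then some model
  else
    -- str(model or "") is just model (model is a str; '' stays '')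
    let nm := PySem.Str.replace model "." "-"
    (PySem.Dict.ofList registry).keys.foldl (fun best key =>
      let nk := PySem.Str.replace key "." "-"
      if (PySem.Str.startswith model key || PySem.Str.startswith model nk ||
          PySem.Str.startswith nm key || PySem.Str.startswith nm nk ||
          PySem.Str.startswith key model || PySem.Str.startswith key nm ||
          PySem.Str.startswith nk model || PySem.Str.startswith nk nm)
         && (match best with
             | none => true
             | some b => decide (PySem.Str.len key > PySem.Str.len b))
      then some key else best) none

-- ===== PORT B =====
-- Source B's helper `matches`
def pvMatches (model nm key : String) : Bool :=
  let nk := PySem.Str.replace key "." "-"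
  [model, nm].any (fun a => [key, nk].any (fun b =>
    PySem.Str.startswith a b || PySem.Str.startswith b a))

def resolve_model_key_py_alt (model : String) (registry : List (String × String)) : Option String :=
  if (PySem.Dict.ofList registry).contains model then some model
  else
    let nm := PySem.Str.replace model "." "-"
    (PySem.List.sorted (PySem.Dict.ofList registry).keys PySem.Str.len true).find?
      (pvMatches model nm)

-- ===== PRECONDITION & SPEC =====
def Spec_resolve_model_key_py (model : String) (registry : List (String × String)) (out : Option String) : Prop := out = resolve_model_key_py_alt model registry
instance (model : String) (registry : List (String × String)) (out : Option String) : Decidable (Spec_resolve_model_key_py model registry out) := by unfold Spec_resolve_model_key_py; infer_instance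

-- ===== CLAIM (what is proved, stated in full; the proofs are below) =====
def Claim_equal_resolve_model_key_py : Prop := ∀ (model : String) (registry : List (String × String)), Dom_resolve_model_key_py model registry → Spec_resolve_model_key_py model registry (resolve_model_key_py model registry)

-- ===== LEMMAS AND PROOFS =====

-- A's loop body, abstracted over the match predicate
def pvStep (p : String → Bool) (best : Option String) (key : String) : Option String :=
  if p key && (match best with
               | none => true
               | some b => decide (PySem.Str.len key > PySem.Str.len b))
  then some key else best

-- inserting k into a length-descending list commutes find? with one running-max step
theorem pv_find_insertBy (p : String → Bool) (k : String) (s : List String)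
    (hs : s.Pairwise (fun a b => PySem.Str.len b ≤ PySem.Str.len a)) :
    (PySem.List.insertBy (fun a b => decide (PySem.Str.len b < PySem.Str.len a)) k s).find? p
      = pvStep p (s.find? p) k := by
  induction s with
  | nil =>
    by_cases hp : p k <;> simp [PySem.List.insertBy, pvStep, hp]
  | cons y t ih =>
    have hy : ∀ b ∈ t, b.length ≤ y.length := by
      intro b hb
      have := (List.pairwise_cons.mp hs).1 b hb
      simpa [PySem.Str.len_eq] using this
    have ht := (List.pairwise_cons.mp hs).2
    by_cases hlt : y.length < k.length
    · -- k goes in front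
      have hfront : PySem.List.insertBy (fun a b => decide (PySem.Str.len b < PySem.Str.len a)) k (y :: t)
          = k :: y :: t := by simp [PySem.List.insertBy, PySem.Str.len_eq, hlt]
      rw [hfront]
      by_cases hp : p k
      · rw [List.find?_cons_of_pos hp]
        rcases hfind : (y :: t).find? p with _ | b
        · simp [pvStep, hp]
        · have hb : b ∈ y :: t := List.mem_of_find?_eq_some hfind
          have hble : b.length ≤ y.length := by
            rcases List.mem_cons.mp hb with rfl | hbt
            · exact le_refl _
            · exact hy b hbt
          simp [pvStep, hp, PySem.Str.len_eq]
          omega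
      · rw [List.find?_cons_of_neg hp]
        simp [pvStep, hp]
    · -- k goes after y
      have hafter : PySem.List.insertBy (fun a b => decide (PySem.Str.len b < PySem.Str.len a)) k (y :: t)
          = y :: PySem.List.insertBy (fun a b => decide (PySem.Str.len b < PySem.Str.len a)) k t := by
        simp [PySem.List.insertBy, PySem.Str.len_eq, hlt]
      rw [hafter]
      by_cases hp : p y
      · rw [List.find?_cons_of_pos hp, List.find?_cons_of_pos hp]
        simp [pvStep, PySem.Str.len_eq]
        intro _
        omega
      · rw [List.find?_cons_of_neg hp, List.find?_cons_of_neg hp]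
        exact ih ht

-- the running-max fold over any key list equals first-match on its stable descending sort
theorem pv_fold_eq_find_sorted (p : String → Bool) (L : List String) :
    L.foldl (pvStep p) none = (PySem.List.sorted L PySem.Str.len true).find? p := by
  induction L using List.reverseRecOn with
  | nil => simp [PySem.List.sorted_rev_eq_foldl_insertBy]
  | append_singleton L k ih =>
    rw [List.foldl_append, PySem.List.sorted_rev_eq_foldl_insertBy, List.foldl_append]
    simp only [List.foldl_cons, List.foldl_nil]
    rw [← PySem.List.sorted_rev_eq_foldl_insertBy,
        pv_find_insertBy p k _ (PySem.List.sorted_pairwise_rev L PySem.Str.len), ih]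

-- A's 8-way disjunction is B's `matches`
theorem pv_pred_eq (model nm key : String) :
    (PySem.Str.startswith model key || PySem.Str.startswith model (PySem.Str.replace key "." "-") ||
     PySem.Str.startswith nm key || PySem.Str.startswith nm (PySem.Str.replace key "." "-") ||
     PySem.Str.startswith key model || PySem.Str.startswith key nm ||
     PySem.Str.startswith (PySem.Str.replace key "." "-") model ||
     PySem.Str.startswith (PySem.Str.replace key "." "-") nm)
      = pvMatches model nm key := by
  simp only [pvMatches, List.any_cons, List.any_nil, Bool.or_false]
  cases PySem.Str.startswith model key <;>
    cases PySem.Str.startswith model (PySem.Str.replace key "." "-") <;>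
    cases PySem.Str.startswith nm key <;>
    cases PySem.Str.startswith nm (PySem.Str.replace key "." "-") <;>
    cases PySem.Str.startswith key model <;>
    cases PySem.Str.startswith key nm <;>
    cases PySem.Str.startswith (PySem.Str.replace key "." "-") model <;>
    cases PySem.Str.startswith (PySem.Str.replace key "." "-") nm <;> rfl

-- ===== VERDICT (by name: the statement is the Claim_ definition above) =====
theorem resolve_model_key_py_spec : Claim_equal_resolve_model_key_py := by
  intro model registry _
  unfold Spec_resolve_model_key_py resolve_model_key_py resolve_model_key_py_alt
  by_cases hc : (PySem.Dict.ofList registry).contains model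
  · simp [hc]
  · simp only [hc, if_false, Bool.false_eq_true]
    have hstep : (fun (best : Option String) (key : String) =>
        let nk := PySem.Str.replace key "." "-"
        if (PySem.Str.startswith model key || PySem.Str.startswith model nk ||
            PySem.Str.startswith (PySem.Str.replace model "." "-") key ||
            PySem.Str.startswith (PySem.Str.replace model "." "-") nk ||
            PySem.Str.startswith key model ||
            PySem.Str.startswith key (PySem.Str.replace model "." "-") ||
            PySem.Str.startswith nk model ||
            PySem.Str.startswith nk (PySem.Str.replace model "." "-"))
           && (match best with
               | none => true
               | some b => decide (PySem.Str.len key > PySem.Str.len b))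
        then some key else best)
        = pvStep (pvMatches model (PySem.Str.replace model "." "-")) := by
      funext best key
      simp only [pvStep, pv_pred_eq model (PySem.Str.replace model "." "-") key]
    rw [hstep, pv_fold_eq_find_sorted]
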